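-- pv_equiv track=rewrite | github.com/Normenghub/Python-For-Coding-Test | Strings3.py | solution
-- ===== SOURCE A (Python) =====
-- def solution(strings):
--     T = ''
--     i = 0
--     while i<len(strings):
--         if strings[i] != 'a' and strings[i] !=  'A':
--             T += strings[i]
--             i +=1
--             continue
--
--         j = i +1
--         while j<len(strings):
--             if strings[j]!= 'a' and strings[j] != 'A':
--                 break
--             j +=1
--         if j-1 ==1:
--            T +=strings[i]
--         else:
--             T+=strings[i].lower()
--
--         i = j
--
--
--     return T
-- ===== SOURCE B (Python) =====
-- def solution(strings):
--     # Collapse each maximal run of 'a'/'A' to a single lowercase 'a', one pass with a flag.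
--     out = []
--     in_run = False
--     for ch in strings:
--         if ch in 'aA':
--             if not in_run:
--                 out.append('a')
--                 in_run = True
--         else:
--             out.append(ch)
--             in_run = False
--     return ''.join(out)
-- ===== Notes on version B (the rewrite author's own statement) =====
-- stated objective: simpler
-- what changed: Replaces A's nested index while-loops (inner scan to find the end of each a/A run, then a case on the run's end index) with a single pass over the characters carrying an in_run flag that emits one 'a' at the start of each run; output is built as a list and joined once instead of repeated string +=.
-- intended difference: On strings whose maximal a/A-run ending just before index 2 starts with 'A', A's accidental `j-1 == 1` check keeps the uppercase 'A' while B collapses the run to lowercase 'a', exactly as A itself does to every other run, so B's value is the intended one. — e.g. on solution("AA"): A returns "A", B returns "a"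
import Mathlib
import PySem

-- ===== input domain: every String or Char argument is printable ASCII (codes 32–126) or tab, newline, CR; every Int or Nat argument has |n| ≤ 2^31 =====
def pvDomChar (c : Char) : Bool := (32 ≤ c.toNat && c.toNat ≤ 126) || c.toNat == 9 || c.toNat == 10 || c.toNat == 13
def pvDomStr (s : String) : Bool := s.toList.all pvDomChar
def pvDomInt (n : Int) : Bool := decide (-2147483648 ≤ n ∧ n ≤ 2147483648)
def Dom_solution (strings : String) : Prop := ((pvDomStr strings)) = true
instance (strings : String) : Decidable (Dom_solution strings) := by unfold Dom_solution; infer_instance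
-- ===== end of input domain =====

-- B collapses each maximal a/A run to one lowercase 'a' in a single pass with a flag
-- (objective: simpler); it intentionally drops A's accidental `j-1 == 1` case, see D_solution.

-- ===== PORT A =====
-- inner while loop: advance j past the run of 'a'/'A' (fuel is only a totality guard;
-- cs.length fuel always suffices since j strictly increases up to cs.length)
def solInner (cs : List Char) (fuel : Nat) (j : Nat) : Nat :=
  match fuel with
  | 0 => j
  | f + 1 =>
    if j < cs.length then
      if cs.getD j ' ' ≠ 'a' ∧ cs.getD j ' ' ≠ 'A' then j
      else solInner cs f (j + 1)
    else j

-- outer while loop of A (fuel is only a totality guard; i strictly increases each iteration)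
def solLoop (cs : List Char) (fuel : Nat) (i : Nat) (T : List Char) : List Char :=
  match fuel with
  | 0 => T
  | f + 1 =>
    if i < cs.length then
      if cs.getD i ' ' ≠ 'a' ∧ cs.getD i ' ' ≠ 'A' then
        solLoop cs f (i + 1) (T ++ [cs.getD i ' '])
      else  -- j := solInner … (i + 1) is Python's j after the inner loop
        solLoop cs f (solInner cs cs.length (i + 1))
          (if solInner cs cs.length (i + 1) - 1 = 1 then T ++ [cs.getD i ' ']
           else T ++ [(cs.getD i ' ').toLower])
    else T

def solution (strings : String) : String :=
  String.ofList (solLoop strings.toList strings.toList.length 0 [])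

-- ===== PORT B =====
-- body of Source B's for loop: state = (out, in_run)
def stepB (st : List Char × Bool) (c : Char) : List Char × Bool :=
  if c = 'a' ∨ c = 'A' then
    if st.2 then st else (st.1 ++ ['a'], true)
  else (st.1 ++ [c], false)

def solution_alt (strings : String) : String :=
  String.ofList (List.foldl stepB ([], false) strings.toList).1

-- ===== PRECONDITION & SPEC =====
-- On strings whose maximal a/A-run ending right before index 2 starts with 'A', A's accidental
-- `j-1 == 1` check keeps the uppercase 'A'; B collapses that run to lowercase 'a', which is what
-- A itself does to every other run, so B's value is the intended one.
def D_solution (strings : String) : Prop :=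
  2 ≤ strings.toList.length ∧
  (strings.toList.getD 1 ' ' = 'a' ∨ strings.toList.getD 1 ' ' = 'A') ∧
  (strings.toList.length = 2 ∨
    (strings.toList.getD 2 ' ' ≠ 'a' ∧ strings.toList.getD 2 ' ' ≠ 'A')) ∧
  (strings.toList.getD 0 ' ' = 'A' ∨
    ((strings.toList.getD 0 ' ' ≠ 'a' ∧ strings.toList.getD 0 ' ' ≠ 'A') ∧
      strings.toList.getD 1 ' ' = 'A'))
instance (strings : String) : Decidable (D_solution strings) := by unfold D_solution; infer_instance

def Spec_solution (strings : String) (out : String) : Prop := ¬ D_solution strings → out = solution_alt strings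
instance (strings : String) (out : String) : Decidable (Spec_solution strings out) := by unfold Spec_solution; infer_instance

def pvDiffWitness_solution : String := "AA"
def pvDiffWitnessOut_solution : String × String := ("A", "a")

-- ===== CLAIM (what is proved, stated in full; the proofs are below) =====
def Claim_unchanged_solution : Prop := ∀ (strings : String), Dom_solution strings → Spec_solution strings (solution strings)
def Claim_changed_solution : Prop := Dom_solution (pvDiffWitness_solution) ∧ D_solution (pvDiffWitness_solution) ∧ solution (pvDiffWitness_solution) = pvDiffWitnessOut_solution.1 ∧ solution_alt (pvDiffWitness_solution) = pvDiffWitnessOut_solution.2 ∧ pvDiffWitnessOut_solution.1 ≠ pvDiffWitnessOut_solution.2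
def Claim_exact_solution : Prop := ∀ (strings : String), Dom_solution strings → D_solution strings → solution strings ≠ solution_alt strings

-- ===== LEMMAS AND PROOFS =====

theorem solInner_zero (cs : List Char) (j : Nat) : solInner cs 0 j = j := rfl

theorem solInner_succ (cs : List Char) (f j : Nat) :
    solInner cs (f + 1) j =
      if j < cs.length then
        if cs.getD j ' ' ≠ 'a' ∧ cs.getD j ' ' ≠ 'A' then j else solInner cs f (j + 1)
      else j := rfl

theorem solLoop_succ (cs : List Char) (f i : Nat) (T : List Char) :
    solLoop cs (f + 1) i T =
      if i < cs.length then
        if cs.getD i ' ' ≠ 'a' ∧ cs.getD i ' ' ≠ 'A' then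
          solLoop cs f (i + 1) (T ++ [cs.getD i ' '])
        else
          solLoop cs f (solInner cs cs.length (i + 1))
            (if solInner cs cs.length (i + 1) - 1 = 1 then T ++ [cs.getD i ' ']
             else T ++ [(cs.getD i ' ').toLower])
      else T := rfl

theorem solLoop_stop (cs : List Char) (i : Nat) (T : List Char) (h : ¬ i < cs.length) :
    ∀ f, solLoop cs f i T = T := by
  intro f
  cases f with
  | zero => rfl
  | succ f => rw [solLoop_succ, if_neg h]

-- the inner loop is the identity when it stops immediately (any fuel)
theorem solInner_stop_at (cs : List Char) (j : Nat)
    (h : ¬ j < cs.length ∨ (cs.getD j ' ' ≠ 'a' ∧ cs.getD j ' ' ≠ 'A')) :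
    ∀ f, solInner cs f j = j := by
  intro f
  cases f with
  | zero => rfl
  | succ f =>
    rw [solInner_succ]
    rcases h with h | h
    · rw [if_neg h]
    · by_cases hj : j < cs.length
      · rw [if_pos hj, if_pos h]
      · rw [if_neg hj]

theorem solInner_step (cs : List Char) (f j : Nat) (hj : j < cs.length)
    (hrun : cs.getD j ' ' = 'a' ∨ cs.getD j ' ' = 'A') :
    solInner cs (f + 1) j = solInner cs f (j + 1) := by
  rw [solInner_succ, if_pos hj, if_neg (fun hcon => hrun.elim hcon.1 hcon.2)]

theorem solInner_ge (cs : List Char) : ∀ (f j : Nat), j ≤ solInner cs f j := by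
  intro f
  induction f with
  | zero => intro j; rw [solInner_zero]
  | succ f ih =>
    intro j
    rw [solInner_succ]
    split_ifs with h1 h2
    · exact le_refl j
    · exact le_trans (Nat.le_succ j) (ih (j + 1))
    · exact le_refl j

theorem solInner_le (cs : List Char) : ∀ (f j : Nat), j ≤ cs.length → solInner cs f j ≤ cs.length := by
  intro f
  induction f with
  | zero => intro j h; rw [solInner_zero]; exact h
  | succ f ih =>
    intro j h
    rw [solInner_succ]
    split_ifs with h1 h2
    · exact h
    · exact ih (j + 1) h1
    · exact h

theorem solInner_run (cs : List Char) : ∀ (f j k : Nat), j ≤ k → k < solInner cs f j →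
    cs.getD k ' ' = 'a' ∨ cs.getD k ' ' = 'A' := by
  intro f
  induction f with
  | zero => intro j k h1 h2; rw [solInner_zero] at h2; omega
  | succ f ih =>
    intro j k h1 h2
    rw [solInner_succ] at h2
    by_cases hj : j < cs.length
    · rw [if_pos hj] at h2
      by_cases hb : cs.getD j ' ' ≠ 'a' ∧ cs.getD j ' ' ≠ 'A'
      · rw [if_pos hb] at h2; omega
      · rw [if_neg hb] at h2
        rcases Nat.lt_or_ge j k with hjk | hjk
        · exact ih (j + 1) k hjk h2
        · have hk : k = j := le_antisymm (by omega) h1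
          subst hk
          by_cases ha : cs.getD k ' ' = 'a'
          · exact Or.inl ha
          · exact Or.inr (by tauto)
    · rw [if_neg hj] at h2; omega

theorem solInner_stop (cs : List Char) : ∀ (f j : Nat), cs.length ≤ f + j →
    solInner cs f j < cs.length →
    cs.getD (solInner cs f j) ' ' ≠ 'a' ∧ cs.getD (solInner cs f j) ' ' ≠ 'A' := by
  intro f
  induction f with
  | zero =>
    intro j hf h
    rw [solInner_zero] at h; omega
  | succ f ih =>
    intro j hf h
    by_cases hj : j < cs.length
    · by_cases hb : cs.getD j ' ' ≠ 'a' ∧ cs.getD j ' ' ≠ 'A'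
      · have heq : solInner cs (f + 1) j = j := by rw [solInner_succ, if_pos hj, if_pos hb]
        rw [heq]; exact hb
      · have heq : solInner cs (f + 1) j = solInner cs f (j + 1) := by
          rw [solInner_succ, if_pos hj, if_neg hb]
        rw [heq] at h ⊢
        exact ih (j + 1) (by omega) h
    · have heq : solInner cs (f + 1) j = j := by rw [solInner_succ, if_neg hj]
      rw [heq] at h; omega

theorem drop_cons_getD (cs : List Char) (i : Nat) (h : i < cs.length) :
    cs.drop i = cs.getD i ' ' :: cs.drop (i + 1) := by
  rw [List.drop_eq_getElem_cons h, List.getD_eq_getElem cs ' ' h]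

-- stepB only appends to the first component
theorem stepB_prefix (l : List Char) : ∀ (T : List Char) (b : Bool),
    List.foldl stepB (T, b) l =
      (T ++ (List.foldl stepB ([], b) l).1, (List.foldl stepB ([], b) l).2) := by
  induction l with
  | nil => intro T b; simp
  | cons c l ih =>
    intro T b
    simp only [List.foldl_cons]
    by_cases hc : c = 'a' ∨ c = 'A'
    · cases b with
      | false =>
        have h1 : stepB (T, false) c = (T ++ ['a'], true) := by simp [stepB, hc]
        have h2 : stepB (([] : List Char), false) c = (['a'], true) := by simp [stepB, hc]
        rw [h1, h2, ih (T ++ ['a']) true, ih ['a'] true]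
        simp
      | true =>
        have h1 : stepB (T, true) c = (T, true) := by simp [stepB, hc]
        have h2 : stepB (([] : List Char), true) c = ([], true) := by simp [stepB, hc]
        rw [h1, h2, ih T true, ih [] true]
    · have h1 : stepB (T, b) c = (T ++ [c], false) := by simp [stepB, hc]
      have h2 : stepB (([] : List Char), b) c = ([c], false) := by simp [stepB, hc]
      rw [h1, h2, ih (T ++ [c]) false, ih [c] false]
      simp

-- folding B over a run of 'a'/'A' with the flag set leaves the state unchanged
theorem run_skip (cs : List Char) (T : List Char) : ∀ (i j : Nat), i ≤ j → j ≤ cs.length →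
    (∀ k, i ≤ k → k < j → (cs.getD k ' ' = 'a' ∨ cs.getD k ' ' = 'A')) →
    List.foldl stepB (T, true) (cs.drop i) = List.foldl stepB (T, true) (cs.drop j) := by
  intro i j hij hj hrun
  rcases Nat.eq_or_lt_of_le hij with h | h
  · subst h; rfl
  · have hi : i < cs.length := lt_of_lt_of_le h hj
    rw [drop_cons_getD cs i hi]
    have ha := hrun i (le_refl i) h
    simp only [List.foldl_cons, stepB, ha, if_true]
    exact run_skip cs T (i + 1) j h hj (fun k hk1 hk2 => hrun k (by omega) hk2)
termination_by i j => j - i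

-- main invariant: A's outer loop from i (with enough fuel) equals B's fold over the suffix
-- with flag false, given (HQ) no quirk-with-'A' fires at a run start from i on, and
-- (Hstart) i itself is not in the middle of a run
theorem main_inv (cs : List Char) : ∀ (n F i : Nat), cs.length - i ≤ n → cs.length - i ≤ F →
    (∀ i', i ≤ i' → (i' = 0 ∨ (cs.getD (i' - 1) ' ' ≠ 'a' ∧ cs.getD (i' - 1) ' ' ≠ 'A')) →
      cs.getD i' ' ' = 'A' → solInner cs cs.length (i' + 1) ≠ 2) →
    ((cs.getD i ' ' = 'a' ∨ cs.getD i ' ' = 'A') →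
      (i = 0 ∨ (cs.getD (i - 1) ' ' ≠ 'a' ∧ cs.getD (i - 1) ' ' ≠ 'A'))) →
    ∀ T, solLoop cs F i T = (List.foldl stepB (T, false) (cs.drop i)).1 := by
  intro n
  induction n with
  | zero =>
    intro F i hn hF HQ Hstart T
    have hi : ¬ i < cs.length := by omega
    rw [solLoop_stop cs i T hi, List.drop_eq_nil_of_le (by omega : cs.length ≤ i)]
    simp
  | succ n ih =>
    intro F i hn hF HQ Hstart T
    by_cases hi : i < cs.length
    · obtain ⟨F', rfl⟩ : ∃ F', F = F' + 1 := ⟨F - 1, by omega⟩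
      rw [solLoop_succ, if_pos hi, drop_cons_getD cs i hi]
      set c := cs.getD i ' ' with hc
      by_cases hb : c ≠ 'a' ∧ c ≠ 'A'
      · rw [if_pos hb]
        simp only [List.foldl_cons]
        have hstep : stepB (T, false) c = (T ++ [c], false) := by
          simp [stepB]; tauto
        rw [hstep]
        exact ih F' (i + 1) (by omega) (by omega)
          (fun i' h1 h2 h3 => HQ i' (by omega) h2 h3)
          (fun _ => Or.inr (by simpa using hb)) (T ++ [c])
      · rw [if_neg hb]
        have hA : c = 'a' ∨ c = 'A' := by tauto
        simp only [List.foldl_cons]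
        have hstep : stepB (T, false) c = (T ++ ['a'], true) := by
          simp [stepB, hA]
        rw [hstep]
        set j := solInner cs cs.length (i + 1) with hjdef
        have hij : i + 1 ≤ j := solInner_ge cs cs.length (i + 1)
        have hjle : j ≤ cs.length := solInner_le cs cs.length (i + 1) (by omega)
        rw [run_skip cs (T ++ ['a']) (i + 1) j hij hjle
          (fun k hk1 hk2 => solInner_run cs cs.length (i + 1) k hk1 (by omega))]
        -- A's resolved char is 'a' in both reachable branches
        have hres : (if j - 1 = 1 then T ++ [c] else T ++ [c.toLower]) = T ++ ['a'] := by
          by_cases h2 : j - 1 = 1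
          · rw [if_pos h2]
            have hj2 : j = 2 := by omega
            rcases hA with ha | ha
            · rw [ha]
            · exact absurd hj2 (HQ i (le_refl i) (Hstart (Or.inr ha)) ha)
          · rw [if_neg h2]
            rcases hA with ha | ha <;> rw [ha] <;> rfl
        rw [hres]
        by_cases hjlt : j < cs.length
        · obtain ⟨hd1, hd2⟩ := solInner_stop cs cs.length (i + 1) (by omega)
            (by rw [← hjdef]; exact hjlt)
          rw [← hjdef] at hd1 hd2
          rw [drop_cons_getD cs j hjlt]
          set d := cs.getD j ' ' with hd
          have hstep2 : stepB (T ++ ['a'], true) d = (T ++ ['a'] ++ [d], false) := by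
            simp only [stepB]
            rw [if_neg (by tauto)]
          rw [List.foldl_cons, hstep2]
          -- A: one more outer iteration at j (non-run branch)
          obtain ⟨F'', rfl⟩ : ∃ F'', F' = F'' + 1 := ⟨F' - 1, by omega⟩
          rw [solLoop_succ, if_pos hjlt, if_pos (And.intro hd1 hd2)]
          exact ih F'' (j + 1) (by omega) (by omega)
            (fun i' h1 h2 h3 => HQ i' (by omega) h2 h3)
            (fun _ => Or.inr (by simpa using And.intro hd1 hd2)) (T ++ ['a'] ++ [d])
        · rw [List.drop_eq_nil_of_le (by omega : cs.length ≤ j)]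
          rw [solLoop_stop cs j _ hjlt]
          simp
    · rw [solLoop_stop cs i T hi, List.drop_eq_nil_of_le (by omega : cs.length ≤ i)]
      simp

-- ¬D gives the HQ hypothesis of main_inv
theorem notD_HQ (strings : String) (hD : ¬ D_solution strings) :
    ∀ i', 0 ≤ i' → (i' = 0 ∨ (strings.toList.getD (i' - 1) ' ' ≠ 'a' ∧ strings.toList.getD (i' - 1) ' ' ≠ 'A')) →
      strings.toList.getD i' ' ' = 'A' → solInner strings.toList strings.toList.length (i' + 1) ≠ 2 := by
  intro i' _ hstart hA hj2
  set cs := strings.toList with hcs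
  have hge := solInner_ge cs cs.length (i' + 1)
  have hi1 : i' ≤ 1 := by omega
  have hilen : i' < cs.length := by
    by_contra h
    rw [List.getD_eq_default cs ' ' (by omega)] at hA
    exact absurd hA (by decide)
  apply hD
  interval_cases i'
  · -- i' = 0 : cs[0] = 'A', solInner cs 1 = 2
    have hj2' : solInner cs cs.length 1 = 2 := hj2
    have hlen2 : 2 ≤ cs.length := by
      have := solInner_le cs cs.length 1 (by omega)
      omega
    have hmid : cs.getD 1 ' ' = 'a' ∨ cs.getD 1 ' ' = 'A' :=
      solInner_run cs cs.length 1 1 (le_refl 1) (by omega)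
    have hstop : cs.length = 2 ∨ (cs.getD 2 ' ' ≠ 'a' ∧ cs.getD 2 ' ' ≠ 'A') := by
      by_cases h2l : 2 < cs.length
      · have := solInner_stop cs cs.length 1 (by omega) (by omega)
        rw [hj2'] at this
        exact Or.inr this
      · exact Or.inl (by omega)
    exact ⟨hlen2, hmid, hstop, Or.inl hA⟩
  · -- i' = 1 : cs[0] not a/A, cs[1] = 'A', solInner cs 2 = 2
    have hj2' : solInner cs cs.length 2 = 2 := hj2
    have hprev : cs.getD 0 ' ' ≠ 'a' ∧ cs.getD 0 ' ' ≠ 'A' := hstart.resolve_left (by decide)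
    have hlen2 : 2 ≤ cs.length := by omega
    have hstop : cs.length = 2 ∨ (cs.getD 2 ' ' ≠ 'a' ∧ cs.getD 2 ' ' ≠ 'A') := by
      by_cases h2l : 2 < cs.length
      · have := solInner_stop cs cs.length 2 (by omega) (by omega)
        rw [hj2'] at this
        exact Or.inr this
      · exact Or.inl (by omega)
    exact ⟨hlen2, Or.inr hA, hstop, Or.inr ⟨hprev, hA⟩⟩

theorem sol_eq (strings : String) (hD : ¬ D_solution strings) :
    solution strings = solution_alt strings := by
  unfold solution solution_alt
  have h := main_inv strings.toList strings.toList.length strings.toList.length 0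
    (by omega) (by omega) (notD_HQ strings hD) (fun _ => Or.inl rfl) []
  simp only [List.drop_zero] at h
  rw [h]

-- ---- tightness: inside D the two outputs really differ ----

-- both programs, continued from index 2 with the run flag set, produce the SAME tail
theorem cont2 (cs : List Char) (hlen : 2 ≤ cs.length)
    (hstop : cs.length = 2 ∨ (cs.getD 2 ' ' ≠ 'a' ∧ cs.getD 2 ' ' ≠ 'A')) :
    ∃ X : List Char, (∀ (F : Nat) (T : List Char), cs.length - 2 ≤ F → solLoop cs F 2 T = T ++ X) ∧
      (∀ T : List Char, (List.foldl stepB (T, true) (cs.drop 2)).1 = T ++ X) := by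
  by_cases h2l : 2 < cs.length
  · have hd : cs.getD 2 ' ' ≠ 'a' ∧ cs.getD 2 ' ' ≠ 'A' := by
      rcases hstop with h | h
      · omega
      · exact h
    set d := cs.getD 2 ' ' with hdd
    refine ⟨d :: (List.foldl stepB ([], false) (cs.drop 3)).1, ?_, ?_⟩
    · intro F T hF
      obtain ⟨F', rfl⟩ : ∃ F', F = F' + 1 := ⟨F - 1, by omega⟩
      rw [solLoop_succ, if_pos h2l, if_pos hd]
      rw [main_inv cs (cs.length - 3) F' 3 (by omega) (by omega)
        (fun i' h1 h2 h3 => by have := solInner_ge cs cs.length (i' + 1); omega)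
        (fun _ => Or.inr (by simpa using hd)) (T ++ [d])]
      rw [stepB_prefix (cs.drop 3) (T ++ [d]) false]
      simp
    · intro T
      rw [drop_cons_getD cs 2 h2l, List.foldl_cons]
      have hstep : stepB (T, true) d = (T ++ [d], false) := by
        simp only [stepB]; rw [if_neg (by tauto)]
      rw [hstep, stepB_prefix (cs.drop 3) (T ++ [d]) false]
      simp
  · refine ⟨[], ?_, ?_⟩
    · intro F T _; rw [solLoop_stop cs 2 T h2l]; simp
    · intro T
      rw [List.drop_eq_nil_of_le (by omega : cs.length ≤ 2)]
      simp

theorem sol_ne (strings : String) (hD : D_solution strings) :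
    solution strings ≠ solution_alt strings := by
  obtain ⟨hlen, hmid, hstop, hcase⟩ := hD
  set cs := strings.toList with hcs
  obtain ⟨X, hAX, hBX⟩ := cont2 cs hlen hstop
  have h0lt : 0 < cs.length := by omega
  have h1lt : 1 < cs.length := by omega
  have hj2 : solInner cs cs.length 2 = 2 := by
    apply solInner_stop_at
    rcases hstop with h' | h'
    · exact Or.inl (by omega)
    · exact Or.inr h'
  have hcons : cs = cs.getD 0 ' ' :: cs.drop 1 := by
    simpa using drop_cons_getD cs 0 h0lt
  obtain ⟨m, hm⟩ : ∃ m, cs.length = m + 2 := ⟨cs.length - 2, by omega⟩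
  unfold solution
  rw [← hcs]
  rcases hcase with hA0 | ⟨hprev, hA1⟩
  · -- run starts at 0 with 'A'
    have hj1 : solInner cs cs.length 1 = 2 := by
      obtain ⟨k, hk⟩ : ∃ k, cs.length = k + 1 := ⟨cs.length - 1, by omega⟩
      rw [hk, solInner_step cs k 1 h1lt hmid]
      apply solInner_stop_at
      rcases hstop with h' | h'
      · exact Or.inl (by omega)
      · exact Or.inr h'
    have hAside : solLoop cs cs.length 0 [] = 'A' :: X := by
      rw [hm, solLoop_succ, if_pos h0lt, if_neg (fun hcon => hcon.2 hA0)]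
      rw [show solInner cs cs.length (0 + 1) = 2 from hj1, hA0]
      rw [if_pos (show (2 : Nat) - 1 = 1 by norm_num)]
      simpa using hAX (m + 1) ([] ++ ['A']) (by omega)
    have hBside : (List.foldl stepB ([], false) cs).1 = 'a' :: X := by
      rw [hcons, List.foldl_cons]
      rw [show stepB (([] : List Char), false) (cs.getD 0 ' ') = (['a'], true) from by
        rw [hA0]; simp [stepB]]
      rw [drop_cons_getD cs 1 h1lt, List.foldl_cons]
      rw [show stepB ((['a'] : List Char), true) (cs.getD 1 ' ') = (['a'], true) from by
        rcases hmid with h | h <;> rw [h] <;> simp [stepB]]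
      simpa using hBX ['a']
    unfold solution_alt
    rw [← hcs, hAside, hBside]
    intro he
    have h' : ('A' :: X) = ('a' :: X) := by simpa using congrArg String.toList he
    simp at h'
  · -- cs[0] not a/A, run is the single char at index 1 (an 'A')
    set c0 := cs.getD 0 ' ' with hc0
    have hAside : solLoop cs cs.length 0 [] = c0 :: 'A' :: X := by
      rw [hm, solLoop_succ, if_pos h0lt, if_pos hprev]
      rw [solLoop_succ, if_pos (show 0 + 1 < cs.length from h1lt),
        if_neg (show ¬ (cs.getD (0 + 1) ' ' ≠ 'a' ∧ cs.getD (0 + 1) ' ' ≠ 'A') from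
          fun hcon => hcon.2 hA1)]
      rw [show solInner cs cs.length (0 + 1 + 1) = 2 from hj2,
        show cs.getD (0 + 1) ' ' = 'A' from hA1]
      rw [if_pos (show (2 : Nat) - 1 = 1 by norm_num)]
      simpa using hAX m ([] ++ [c0] ++ ['A']) (by omega)
    have hBside : (List.foldl stepB ([], false) cs).1 = c0 :: 'a' :: X := by
      rw [hcons, List.foldl_cons]
      rw [show stepB (([] : List Char), false) c0 = ([c0], false) from by
        simp only [stepB]
        rw [if_neg (fun hcon => hcon.elim (fun h => hprev.1 h) (fun h => hprev.2 h))]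
        rfl]
      rw [drop_cons_getD cs 1 h1lt, List.foldl_cons]
      rw [show stepB (([c0] : List Char), false) (cs.getD 1 ' ') = ([c0, 'a'], true) from by
        rcases hmid with h | h <;> rw [h] <;> simp [stepB]]
      simpa using hBX [c0, 'a']
    unfold solution_alt
    rw [← hcs, hAside, hBside]
    intro he
    have h' : (c0 :: 'A' :: X) = (c0 :: 'a' :: X) := by simpa using congrArg String.toList he
    simp at h'

-- ===== VERDICT (by name: the statements are the Claim_ definitions above) =====
theorem solution_spec : Claim_unchanged_solution := by
  intro strings _
  unfold Spec_solution
  exact sol_eq strings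

theorem solution_changed : Claim_changed_solution := by
  unfold Claim_changed_solution; decide

theorem solution_tight : Claim_exact_solution := by
  intro strings _ hD
  exact sol_ne strings hD
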